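-- pv_equiv track=rewrite | github.com/hitbox/scratch | pygame/pygamelib.py | groupby_columns
-- ===== SOURCE A (Python) =====
-- import itertools as it
-- import operator as op
--
-- def sorted_groupby(iterable, key=None, reverse=False):
--     """
--     Convenience for sorting and then grouping.
--     """
--     return it.groupby(sorted(iterable, key=key, reverse=reverse), key=key)
--
-- def groupby_columns(items, ncols):
--     # two tuples matched by index to items
--     def rowcol(index):
--         return divmod(index, ncols)
--
--     rows, cols = zip(*map(rowcol, range(len(items))))
--
--     # NOTE
--     # - must consider duplicate items
--     # - would like to do something like `list.index(item)` for the key func but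
--     #   it returns the first match
--     # - so keep the item and row or col indexes together and strip them later.
--     first = op.itemgetter(0)
--     rows = sorted_groupby(zip(rows, items), key=first)
--     cols = sorted_groupby(zip(cols, items), key=first)
--
--     # consume groupings, ignorning key, and then stripping the key associated
--     # with items off
--     rows = [[item for _, item in group] for _, group in rows]
--     cols = [[item for _, item in group] for _, group in cols]
--
--     return (rows, cols)
-- ===== SOURCE B (Python) =====
-- def groupby_columns(items, ncols):
--     # One pass: bucket items into per-row and per-column dicts keyed by divmod,
--     # then emit the buckets in sorted key order. No sort of the items, no groupby.
--     rows = {}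
--     cols = {}
--     for i, item in enumerate(items):
--         r, c = divmod(i, ncols)
--         rows.setdefault(r, []).append(item)
--         cols.setdefault(c, []).append(item)
--     return ([rows[k] for k in sorted(rows)], [cols[k] for k in sorted(cols)])
-- ===== Notes on version B (the rewrite author's own statement) =====
-- stated objective: faster
-- what changed: A builds (key,item) pairs, sorts them and runs itertools.groupby twice; B makes one pass over enumerate(items), bucketing each item into per-row and per-column dicts keyed by divmod, and emits the buckets in sorted key order (only the few distinct keys are sorted).
import Mathlib
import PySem

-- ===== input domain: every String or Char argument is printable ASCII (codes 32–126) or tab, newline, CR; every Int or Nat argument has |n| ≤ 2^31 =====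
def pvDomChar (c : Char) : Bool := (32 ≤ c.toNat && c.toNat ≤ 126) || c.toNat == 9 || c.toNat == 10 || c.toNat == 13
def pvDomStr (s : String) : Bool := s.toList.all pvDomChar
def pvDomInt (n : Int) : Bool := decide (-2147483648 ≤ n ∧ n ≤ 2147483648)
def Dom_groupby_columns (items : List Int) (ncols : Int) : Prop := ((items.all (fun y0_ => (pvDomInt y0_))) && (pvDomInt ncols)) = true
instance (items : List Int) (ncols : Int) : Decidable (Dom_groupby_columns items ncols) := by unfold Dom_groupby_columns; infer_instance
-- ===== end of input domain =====

-- B replaces A's sort-the-pairs-then-groupby (O(n log n)) by one bucketing pass over the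
-- items into two dicts keyed by divmod, emitting buckets in sorted key order.

-- ===== PORT A =====
-- it.groupby over a list sorted by key groups consecutive runs of equal keys:
-- ported as head-run recursion (takeWhile/dropWhile on the head's key).
def pvGroupAdj : List (Int × Int) → List (List (Int × Int))
  | [] => []
  | p :: rest =>
      (p :: rest.takeWhile (fun q => q.1 == p.1)) ::
        pvGroupAdj (rest.dropWhile (fun q => q.1 == p.1))
  termination_by l => l.length
  decreasing_by
    simpa [Nat.lt_succ_iff] using List.length_dropWhile_le (fun q => q.1 == p.1) rest

-- sorted_groupby(zip(keys, items), key=first), groups only (keys are consumed/ignored)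
def pvSortedGroupby (pairs : List (Int × Int)) : List (List (Int × Int)) :=
  pvGroupAdj (PySem.List.sorted pairs (fun p => p.1))

def groupby_columns (items : List Int) (ncols : Int) : List (List Int) × List (List Int) :=
  let idx := PySem.List.pyRange 0 (items.length : Int)
  let rowKeys := idx.map (fun i => PySem.Int.floordiv i ncols)   -- divmod(index, ncols).0
  let colKeys := idx.map (fun i => PySem.Int.mod i ncols)        -- divmod(index, ncols).1
  let rows := (pvSortedGroupby (rowKeys.zip items)).map (fun g => g.map (fun p => p.2))
  let cols := (pvSortedGroupby (colKeys.zip items)).map (fun g => g.map (fun p => p.2))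
  (rows, cols)

-- ===== PORT B =====
-- one pass over enumerate(items): rows.setdefault(r, []).append(item) is exactly
-- d.modify r [] (· ++ [item]) (same resulting value and same key insertion order)
def groupby_columns_alt (items : List Int) (ncols : Int) : List (List Int) × List (List Int) :=
  let dicts := (PySem.List.enumerate items 0).foldl
    (fun (d : PySem.Dict Int (List Int) × PySem.Dict Int (List Int)) p =>
      (d.1.modify (PySem.Int.floordiv p.1 ncols) [] (fun v => v ++ [p.2]),
       d.2.modify (PySem.Int.mod p.1 ncols) [] (fun v => v ++ [p.2])))
    (PySem.Dict.empty, PySem.Dict.empty)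
  ((PySem.List.sorted dicts.1.keys (fun k => k)).map (fun k => dicts.1.getD k []),
   (PySem.List.sorted dicts.2.keys (fun k => k)).map (fun k => dicts.2.getD k []))

-- ===== PRECONDITION & SPEC =====
-- Pre_ excludes exactly the inputs where Python A raises: items = [] (ValueError from
-- unpacking an empty zip) and ncols = 0 (ZeroDivisionError in divmod).
def Pre_groupby_columns (items : List Int) (ncols : Int) : Prop := items ≠ [] ∧ ncols ≠ 0
instance (items : List Int) (ncols : Int) : Decidable (Pre_groupby_columns items ncols) := by
  unfold Pre_groupby_columns; infer_instance
def pvWitness_groupby_columns : List Int × Int := ([1, 2, 3], 2)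

def Spec_groupby_columns (items : List Int) (ncols : Int) (out : List (List Int) × List (List Int)) : Prop := out = groupby_columns_alt items ncols
instance (items : List Int) (ncols : Int) (out : List (List Int) × List (List Int)) : Decidable (Spec_groupby_columns items ncols out) := by unfold Spec_groupby_columns; infer_instance

-- ===== CLAIM (what is proved, stated in full; the proofs are below) =====
def Claim_equal_groupby_columns : Prop := ∀ (items : List Int) (ncols : Int), Dom_groupby_columns items ncols → Pre_groupby_columns items ncols → Spec_groupby_columns items ncols (groupby_columns items ncols)

-- ===== LEMMAS AND PROOFS =====

lemma pv_filter_insertBy (k : Int) (x : Int × Int) (acc : List (Int × Int))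
    (h : acc.Pairwise (fun a b => a.1 ≤ b.1)) :
    (PySem.List.insertBy (fun a b => decide (a.1 < b.1)) x acc).filter (fun p => p.1 == k)
      = acc.filter (fun p => p.1 == k) ++ if x.1 == k then [x] else [] := by
  induction acc with
  | nil => simp [PySem.List.insertBy]; split <;> simp_all
  | cons y ys ih =>
    rw [List.pairwise_cons] at h
    rw [PySem.List.insertBy]
    by_cases hxy : x.1 < y.1
    · simp only [hxy, decide_true, if_true]
      by_cases hxk : x.1 = k
      · have hnil : (y :: ys).filter (fun p => p.1 == k) = [] := by
          rw [List.filter_eq_nil_iff]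
          intro p hp
          rcases List.mem_cons.mp hp with rfl | hp'
          · simp; omega
          · have := h.1 p hp'; simp; omega
        simp [hxk, hnil]
      · simp only [List.filter_cons]
        simp [hxk]
    · rw [if_neg (by simp [hxy])]
      rw [List.filter_cons, List.filter_cons, ih h.2]
      by_cases hyk : y.1 = k <;> simp [hyk]

lemma pv_filter_foldl_insertBy (P : List (Int × Int)) (k : Int) : ∀ (acc : List (Int × Int)),
    acc.Pairwise (fun a b => a.1 ≤ b.1) →
    (P.foldl (fun acc x => PySem.List.insertBy (fun a b => decide (a.1 < b.1)) x acc) acc).filter (fun p => p.1 == k)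
      = acc.filter (fun p => p.1 == k) ++ P.filter (fun p => p.1 == k) := by
  induction P with
  | nil => simp
  | cons x t ih =>
    intro acc h
    rw [List.foldl_cons]
    have hins := PySem.List.insertBy_pairwise_le (fun p : Int × Int => p.1) x acc h
    rw [ih _ hins, pv_filter_insertBy k x acc h, List.filter_cons]
    by_cases hxk : x.1 = k <;> simp [hxk]

lemma pv_filter_sorted (P : List (Int × Int)) (k : Int) :
    (PySem.List.sorted P (fun p => p.1)).filter (fun p => p.1 == k)
      = P.filter (fun p => p.1 == k) := by
  rw [PySem.List.sorted_eq_foldl_insertBy, pv_filter_foldl_insertBy P k [] (by simp)]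
  simp

lemma pv_dropWhile_head_false {α : Type} (pr : α → Bool) : ∀ (l : List α) {d : α} {D' : List α},
    l.dropWhile pr = d :: D' → pr d = false := by
  intro l
  induction l with
  | nil => intro d D' h; simp at h
  | cons a t ih =>
    intro d D' h
    rw [List.dropWhile_cons] at h
    by_cases ha : pr a
    · rw [if_pos ha] at h; exact ih h
    · rw [if_neg ha] at h; cases h; simpa using ha

lemma pv_groupAdj_eq_map_filter : ∀ (K : List Int) (S : List (Int × Int)),
    S.Pairwise (fun a b => a.1 ≤ b.1) → K.Pairwise (· < ·) →
    (∀ k, k ∈ K ↔ k ∈ S.map (fun p => p.1)) →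
    pvGroupAdj S = K.map (fun k => S.filter (fun p => p.1 == k)) := by
  intro K
  induction K with
  | nil =>
    intro S hS hK hmem
    cases S with
    | nil => simp [pvGroupAdj]
    | cons p rest => exact absurd ((hmem p.1).mpr (by simp)) (by simp)
  | cons k K' ih =>
    intro S hS hK hmem
    cases S with
    | nil => exact absurd ((hmem k).mp (by simp)) (by simp)
    | cons p rest =>
      rw [List.pairwise_cons] at hS hK
      have hpk : p.1 = k := by
        have hmemp : p.1 ∈ k :: K' := (hmem p.1).mpr (by simp)
        rcases List.mem_cons.mp hmemp with h1 | h1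
        · exact h1
        · exfalso
          have hkp : k < p.1 := hK.1 _ h1
          have hkm : k ∈ (p :: rest).map (fun p => p.1) := (hmem k).mp (by simp)
          rcases List.mem_map.mp hkm with ⟨q, hq, hqk⟩
          rcases List.mem_cons.mp hq with rfl | hq'
          · omega
          · have := hS.1 q hq'; omega
      have hTD : rest.takeWhile (fun q => q.1 == p.1) ++ rest.dropWhile (fun q => q.1 == p.1) = rest :=
        List.takeWhile_append_dropWhile
      have hTkey : ∀ q ∈ rest.takeWhile (fun q => q.1 == p.1), q.1 = p.1 :=
        fun q hq => by simpa using List.mem_takeWhile_imp hq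
      have hDsub : (rest.dropWhile (fun q => q.1 == p.1)).Sublist rest := List.dropWhile_sublist _
      have hDpw : (rest.dropWhile (fun q => q.1 == p.1)).Pairwise (fun a b => a.1 ≤ b.1) :=
        hS.2.sublist hDsub
      have hDgt : ∀ q ∈ rest.dropWhile (fun q => q.1 == p.1), p.1 < q.1 := by
        intro q hq
        cases hD0 : rest.dropWhile (fun q => q.1 == p.1) with
        | nil => rw [hD0] at hq; simp at hq
        | cons d D' =>
          have hdf := pv_dropWhile_head_false (fun q : Int × Int => q.1 == p.1) rest hD0
          have hdne : d.1 ≠ p.1 := by simpa using hdf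
          have hdrest : d ∈ rest := hDsub.subset (by rw [hD0]; simp)
          have hpd : p.1 < d.1 := lt_of_le_of_ne (hS.1 d hdrest) (Ne.symm hdne)
          rw [hD0] at hq hDpw
          rcases List.mem_cons.mp hq with rfl | hq'
          · exact hpd
          · have := (List.pairwise_cons.mp hDpw).1 q hq'; omega
      have ha : (p :: rest).filter (fun q => q.1 == k) = p :: rest.takeWhile (fun q => q.1 == p.1) := by
        rw [List.filter_cons, if_pos (by simp [hpk])]
        congr 1
        conv_lhs => rw [← hTD]
        rw [List.filter_append]
        have h1 : (rest.takeWhile (fun q => q.1 == p.1)).filter (fun q => q.1 == k)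
            = rest.takeWhile (fun q => q.1 == p.1) :=
          List.filter_eq_self.mpr (fun q hq => by have := hTkey q hq; simp; omega)
        have h2 : (rest.dropWhile (fun q => q.1 == p.1)).filter (fun q => q.1 == k) = [] :=
          List.filter_eq_nil_iff.mpr (fun q hq => by have := hDgt q hq; simp; omega)
        rw [h1, h2, List.append_nil]
      have hb : ∀ k' ∈ K', (p :: rest).filter (fun q => q.1 == k')
          = (rest.dropWhile (fun q => q.1 == p.1)).filter (fun q => q.1 == k') := by
        intro k' hk'
        have hkk' : k < k' := hK.1 _ hk'
        rw [List.filter_cons, if_neg (by simp; omega)]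
        conv_lhs => rw [← hTD]
        rw [List.filter_append]
        have h1 : (rest.takeWhile (fun q => q.1 == p.1)).filter (fun q => q.1 == k') = [] :=
          List.filter_eq_nil_iff.mpr (fun q hq => by have := hTkey q hq; simp; omega)
        rw [h1, List.nil_append]
      have hc : ∀ k', k' ∈ K' ↔ k' ∈ (rest.dropWhile (fun q => q.1 == p.1)).map (fun p => p.1) := by
        intro k'
        constructor
        · intro hk'
          have hkk' : k < k' := hK.1 _ hk'
          have hm : k' ∈ (p :: rest).map (fun p => p.1) := (hmem k').mp (List.mem_cons_of_mem _ hk')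
          rcases List.mem_map.mp hm with ⟨q, hq, rfl⟩
          rcases List.mem_cons.mp hq with rfl | hq'
          · omega
          · conv at hq' => rw [← hTD]
            rcases List.mem_append.mp hq' with hqT | hqD
            · have := hTkey q hqT; omega
            · exact List.mem_map.mpr ⟨q, hqD, rfl⟩
        · intro hk'
          rcases List.mem_map.mp hk' with ⟨q, hq, rfl⟩
          have hqS : q ∈ p :: rest := List.mem_cons_of_mem _ (hDsub.subset hq)
          have hm : q.1 ∈ k :: K' := (hmem q.1).mpr (List.mem_map.mpr ⟨q, hqS, rfl⟩)
          rcases List.mem_cons.mp hm with h1 | h1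
          · exfalso; have := hDgt q hq; omega
          · exact h1
      rw [pvGroupAdj, ih _ hDpw hK.2 hc, List.map_cons]
      congr 1
      · exact ha.symm
      · exact (List.map_congr_left (fun k' hk' => (hb k' hk').symm))

lemma pv_A_canon (P : List (Int × Int)) :
    pvSortedGroupby P
      = (PySem.List.sorted (PySem.Set.ofList (P.map (fun p => p.1))) (fun k => k)).map
          (fun k => P.filter (fun p => p.1 == k)) := by
  unfold pvSortedGroupby
  have h := pv_groupAdj_eq_map_filter
    (PySem.List.sorted (PySem.Set.ofList (P.map (fun p => p.1))) (fun k => k))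
    (PySem.List.sorted P (fun p => p.1))
    (PySem.List.sorted_pairwise P (fun p => p.1))
    (PySem.List.sorted_ofList_pairwise_lt _)
    (by
      intro k
      rw [PySem.List.mem_sorted, PySem.Set.mem_ofList]
      constructor
      · intro hk
        rcases List.mem_map.mp hk with ⟨q, hq, rfl⟩
        exact List.mem_map.mpr ⟨q, (PySem.List.mem_sorted _ _ _ _).mpr hq, rfl⟩
      · intro hk
        rcases List.mem_map.mp hk with ⟨q, hq, rfl⟩
        exact List.mem_map.mpr ⟨q, (PySem.List.mem_sorted _ _ _ _).mp hq, rfl⟩)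
  rw [h]
  exact List.map_congr_left (fun k _ => pv_filter_sorted P k)

lemma pv_enumerate_eq_zip : ∀ (xs : List Int) (s : Int),
    PySem.List.enumerate xs s = (PySem.List.pyRange s (s + xs.length)).zip xs := by
  intro xs
  induction xs with
  | nil => intro s; simp [PySem.List.enumerate]
  | cons x t ih =>
    intro s
    have hb : s + ((x :: t).length : Int) = s + 1 + (t.length : Int) := by simp; omega
    rw [PySem.List.pyRange_one_cons (by simp), hb]
    simp only [PySem.List.enumerate, List.zip_cons_cons]
    rw [ih (s + 1)]

lemma pv_B_dict_getD (items : List Int) (f : Int → Int) (k : Int) :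
    (((PySem.List.enumerate items 0).foldl
        (fun (d : PySem.Dict Int (List Int)) p => d.modify (f p.1) [] (fun v => v ++ [p.2]))
        PySem.Dict.empty).getD k [])
      = ((((PySem.List.enumerate items 0).map (fun p => (f p.1, p.2))).filter
          (fun p => p.1 == k)).map (fun p => p.2)) := by
  have h := PySem.Dict.getD_foldl_modify_append
    ((PySem.List.enumerate items 0).map (fun p => (f p.1, p.2)))
    (PySem.Dict.empty : PySem.Dict Int (List Int)) k
  rw [List.foldl_map] at h
  simpa using h

lemma pv_B_dict_keys (items : List Int) (f : Int → Int) :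
    (((PySem.List.enumerate items 0).foldl
        (fun (d : PySem.Dict Int (List Int)) p => d.modify (f p.1) [] (fun v => v ++ [p.2]))
        PySem.Dict.empty).keys)
      = PySem.Set.ofList (((PySem.List.enumerate items 0).map (fun p => (f p.1, p.2))).map (fun p => p.1)) := by
  have h := PySem.Dict.keys_foldl_modify_key (PySem.List.enumerate items 0)
    (fun p : Int × Int => f p.1) ([] : List Int) (fun _ p => fun v => v ++ [p.2])
    (PySem.Dict.empty : PySem.Dict Int (List Int))
  rw [h]
  simp [List.map_map]
  rfl

lemma pv_component (items : List Int) (f : Int → Int) :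
    (pvSortedGroupby (((PySem.List.pyRange 0 (items.length : Int)).map f).zip items)).map
        (fun g => g.map (fun p => p.2))
      = (PySem.List.sorted ((PySem.List.enumerate items 0).foldl
            (fun (d : PySem.Dict Int (List Int)) p => d.modify (f p.1) [] (fun v => v ++ [p.2]))
            PySem.Dict.empty).keys (fun k => k)).map
          (fun k => ((PySem.List.enumerate items 0).foldl
            (fun (d : PySem.Dict Int (List Int)) p => d.modify (f p.1) [] (fun v => v ++ [p.2]))
            PySem.Dict.empty).getD k []) := by
  have hP : ((PySem.List.pyRange 0 (items.length : Int)).map f).zip items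
      = (PySem.List.enumerate items 0).map (fun p => (f p.1, p.2)) := by
    rw [List.zip_map_left, pv_enumerate_eq_zip items 0]
    simp [Prod.map]
  rw [hP, pv_A_canon, pv_B_dict_keys items f, List.map_map]
  refine List.map_congr_left (fun k _ => ?_)
  rw [pv_B_dict_getD items f k]
  rfl


-- ===== VERDICT (by name: the statement is the Claim_ definition above) =====
theorem groupby_columns_spec : Claim_equal_groupby_columns := by
  intro items ncols _ _
  unfold Spec_groupby_columns groupby_columns groupby_columns_alt
  have hsplit :
      (PySem.List.enumerate items 0).foldl
        (fun (d : PySem.Dict Int (List Int) × PySem.Dict Int (List Int)) p =>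
          (d.1.modify (PySem.Int.floordiv p.1 ncols) [] (fun v => v ++ [p.2]),
           d.2.modify (PySem.Int.mod p.1 ncols) [] (fun v => v ++ [p.2])))
        (PySem.Dict.empty, PySem.Dict.empty)
      = ((PySem.List.enumerate items 0).foldl
          (fun (d : PySem.Dict Int (List Int)) p =>
            d.modify (PySem.Int.floordiv p.1 ncols) [] (fun v => v ++ [p.2])) PySem.Dict.empty,
         (PySem.List.enumerate items 0).foldl
          (fun (d : PySem.Dict Int (List Int)) p =>
            d.modify (PySem.Int.mod p.1 ncols) [] (fun v => v ++ [p.2])) PySem.Dict.empty) :=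
    PySem.List.foldl_prod_mk
      (fun (d : PySem.Dict Int (List Int)) (p : Int × Int) =>
        d.modify (PySem.Int.floordiv p.1 ncols) [] (fun v => v ++ [p.2]))
      (fun (d : PySem.Dict Int (List Int)) (p : Int × Int) =>
        d.modify (PySem.Int.mod p.1 ncols) [] (fun v => v ++ [p.2]))
      (PySem.List.enumerate items 0) PySem.Dict.empty PySem.Dict.empty
  rw [hsplit]
  refine Prod.ext ?_ ?_
  · exact pv_component items (fun i => PySem.Int.floordiv i ncols)
  · exact pv_component items (fun i => PySem.Int.mod i ncols)
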